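-- pv_equiv track=rewrite | github.com/utsavanand/omni-cli | src/main.py | parse_flag
-- ===== SOURCE A (Python) =====
-- def parse_flag(args_string, flag_name):
--     """
--     Parse a flag and its value from an argument string.
--
--     Args:
--         args_string: The full argument string (e.g., "chat-name --project my-webapp")
--         flag_name: The flag to look for (e.g., "--project")
--
--     Returns:
--         tuple: (flag_value, remaining_args) or (None, args_string) if flag not found
--
--     Examples:
--         >>> parse_flag("chat-name --project webapp", "--project")
--         ("webapp", "chat-name")
--         >>> parse_flag("just-a-name", "--project")
--         (None, "just-a-name")
--     """
--     if not args_string: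
--         return None, args_string
--
--     parts = args_string.split()
--
--     if flag_name not in parts:
--         return None, args_string
--
--     try:
--         flag_idx = parts.index(flag_name)
--         if flag_idx + 1 < len(parts):
--             flag_value = parts[flag_idx + 1]
--             # Remove flag and value from parts
--             remaining_parts = [p for i, p in enumerate(parts) if i not in [flag_idx, flag_idx + 1]]
--             remaining_args = ' '.join(remaining_parts)
--             return flag_value, remaining_args
--         else:
--             # Flag exists but no value provided
--             return '', args_string
--     except (ValueError, IndexError):
--         return None, args_string
-- ===== SOURCE B (Python) =====
-- def parse_flag(args_string, flag_name):
--     # One-pass state machine over the tokens: 0 = searching, 1 = flag seen,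
--     # awaiting its value, 2 = value captured; tokens not consumed by the
--     # flag/value pair are accumulated as they stream by.
--     state, value, kept = 0, None, []
--     for p in args_string.split():
--         if state == 0 and p == flag_name:
--             state = 1
--         elif state == 1:
--             value, state = p, 2
--         else:
--             kept.append(p)
--     if state == 2:
--         return value, ' '.join(kept)
--     if state == 1:
--         return '', args_string
--     return None, args_string
-- ===== Notes on version B (the rewrite author's own statement) =====
-- stated objective: alternative
-- what changed: Replaces A's index arithmetic (membership test, .index, and an index-filtering comprehension over enumerate) with a single-pass three-state machine fold that never uses indices: it streams the tokens once, switching state on the first flag match, capturing the next token as the value, and accumulating all other tokens for the remainder.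
import Mathlib
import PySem

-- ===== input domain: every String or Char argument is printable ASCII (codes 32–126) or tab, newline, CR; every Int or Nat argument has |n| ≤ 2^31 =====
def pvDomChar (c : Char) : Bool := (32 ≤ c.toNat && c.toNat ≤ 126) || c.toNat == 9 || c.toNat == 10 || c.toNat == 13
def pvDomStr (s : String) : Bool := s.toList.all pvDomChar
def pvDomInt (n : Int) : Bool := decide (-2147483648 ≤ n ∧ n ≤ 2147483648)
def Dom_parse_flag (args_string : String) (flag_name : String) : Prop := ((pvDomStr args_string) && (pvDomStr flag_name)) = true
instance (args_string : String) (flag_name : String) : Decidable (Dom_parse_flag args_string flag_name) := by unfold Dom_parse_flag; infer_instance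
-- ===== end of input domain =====

-- B replaces A's index arithmetic (membership test, .index, index-filtering comprehension)
-- with a single-pass three-state machine fold over the tokens; same return value.

-- ===== PORT A =====
def parse_flag (args_string : String) (flag_name : String) : Option String × String :=
  if args_string == "" then (none, args_string)
  else
    let parts := PySem.Str.split₀ args_string
    if ¬ (flag_name ∈ parts) then (none, args_string)
    else
      match PySem.List.index? parts flag_name with
      | none => (none, args_string)       -- ValueError branch of the try/except
      | some flag_idx =>
        if (flag_idx : Int) + 1 < (parts.length : Int) then
          match PySem.List.pyGet? parts ((flag_idx : Int) + 1) with
          | none => (none, args_string)   -- IndexError branch of the try/except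
          | some flag_value =>
            let remaining_parts :=
              ((PySem.List.enumerate parts).filter
                (fun ip => !(ip.1 == (flag_idx : Int) || ip.1 == (flag_idx : Int) + 1))).map (·.2)
            (some flag_value, PySem.Str.join " " remaining_parts)
        else (some "", args_string)

-- ===== PORT B =====
-- Source B's loop body: state 0 = searching, 1 = flag seen (awaiting value), 2 = value captured
def pfStep (flag_name : String) (st : Int × Option String × List String) (p : String) :
    Int × Option String × List String :=
  if st.1 == 0 && p == flag_name then (1, st.2.1, st.2.2)
  else if st.1 == 1 then (2, some p, st.2.2)
  else (st.1, st.2.1, st.2.2 ++ [p])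

def parse_flag_alt (args_string : String) (flag_name : String) : Option String × String :=
  let st := (PySem.Str.split₀ args_string).foldl (pfStep flag_name)
    ((0 : Int), (none : Option String), ([] : List String))
  if st.1 == 2 then (st.2.1, PySem.Str.join " " st.2.2)
  else if st.1 == 1 then (some "", args_string)
  else (none, args_string)

-- ===== PRECONDITION & SPEC =====
def Spec_parse_flag (args_string : String) (flag_name : String) (out : Option String × String) : Prop := out = parse_flag_alt args_string flag_name
instance (args_string : String) (flag_name : String) (out : Option String × String) : Decidable (Spec_parse_flag args_string flag_name out) := by unfold Spec_parse_flag; infer_instance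

-- ===== CLAIM (what is proved, stated in full; the proofs are below) =====
def Claim_equal_parse_flag : Prop := ∀ (args_string : String) (flag_name : String), Dom_parse_flag args_string flag_name → Spec_parse_flag args_string flag_name (parse_flag args_string flag_name)

-- ===== LEMMAS AND PROOFS =====

theorem fold_searching (f : String) (l : List String) (kept : List String) (h : f ∉ l) :
    l.foldl (pfStep f) (0, none, kept) = (0, none, kept ++ l) := by
  induction l generalizing kept with
  | nil => simp
  | cons x xs ih =>
    have hx : (x == f) = false := by
      simp only [beq_eq_false_iff_ne]; exact fun hxf => h (hxf ▸ List.mem_cons_self)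
    simp only [List.foldl_cons, pfStep, hx, Bool.and_false, Bool.false_eq_true, if_false]
    norm_num
    rw [ih (kept ++ [x]) (fun hm => h (List.mem_cons_of_mem _ hm))]
    simp

theorem fold_done (f : String) (l : List String) (v : Option String) (kept : List String) :
    l.foldl (pfStep f) (2, v, kept) = (2, v, kept ++ l) := by
  induction l generalizing kept with
  | nil => simp
  | cons x xs ih =>
    simp only [List.foldl_cons, pfStep]
    norm_num
    rw [ih (kept ++ [x])]
    simp

theorem fold_first (f : String) (pre suf : List String) (hpre : f ∉ pre) :
    (pre ++ f :: suf).foldl (pfStep f) (0, none, []) =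
      (match suf with
       | [] => (1, none, pre)
       | v :: suf' => (2, some v, pre ++ suf')) := by
  rw [List.foldl_append, fold_searching f pre [] hpre, List.nil_append, List.foldl_cons]
  simp only [pfStep, beq_self_eq_true, Bool.and_true]
  norm_num
  match suf with
  | [] => simp
  | v :: suf' =>
    simp only [List.foldl_cons, pfStep]
    norm_num
    exact fold_done f suf' (some v) pre

theorem filter_enumerate_cut (pre suf' : List String) (f v : String) :
    (((PySem.List.enumerate (pre ++ f :: v :: suf')).filter
        (fun ip => !(ip.1 == (pre.length : Int) || ip.1 == (pre.length : Int) + 1))).map (·.2))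
      = pre ++ suf' := by
  rw [PySem.List.enumerate_append, PySem.List.enumerate_cons, PySem.List.enumerate_cons,
    List.filter_append, List.filter_cons, List.filter_cons]
  have hp : (PySem.List.enumerate pre 0).filter
      (fun ip => !(ip.1 == (pre.length : Int) || ip.1 == (pre.length : Int) + 1))
      = PySem.List.enumerate pre 0 := by
    rw [List.filter_eq_self]
    intro p hp
    obtain ⟨k, hk, rfl⟩ := (PySem.List.mem_enumerate_iff pre 0 p).mp hp
    simp only [Bool.not_eq_eq_eq_not, Bool.not_true, Bool.or_eq_false_iff, beq_eq_false_iff_ne]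
    constructor <;> (intro h; omega)
  have hs : (PySem.List.enumerate suf' (0 + (pre.length : Int) + 1 + 1)).filter
      (fun ip => !(ip.1 == (pre.length : Int) || ip.1 == (pre.length : Int) + 1))
      = PySem.List.enumerate suf' (0 + (pre.length : Int) + 1 + 1) := by
    rw [List.filter_eq_self]
    intro p hp
    obtain ⟨k, hk, rfl⟩ := (PySem.List.mem_enumerate_iff suf' _ p).mp hp
    simp only [Bool.not_eq_eq_eq_not, Bool.not_true, Bool.or_eq_false_iff, beq_eq_false_iff_ne]
    constructor <;> (intro h; omega)
  simp only [hp, hs]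
  simp [PySem.List.map_snd_enumerate]

theorem get?_at_succ (pre suf' : List String) (f v : String) :
    (pre ++ f :: v :: suf')[pre.length + 1]? = some v := by
  rw [List.getElem?_append_right (by omega)]
  simp

theorem split_empty : PySem.Str.split₀ "" = [] := by decide

-- ===== VERDICT (by name: the statement is the Claim_ definition above) =====
theorem parse_flag_spec : Claim_equal_parse_flag := by
  intro args flag _
  unfold Spec_parse_flag parse_flag parse_flag_alt
  by_cases h0 : args = ""
  · subst h0
    rw [split_empty]
    simp
  · simp only [beq_iff_eq, h0, if_false]
    set parts := PySem.Str.split₀ args with hparts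
    by_cases hmem : flag ∈ parts
    · simp only [hmem, not_true, if_false]
      obtain ⟨k, hk⟩ := Option.isSome_iff_exists.mp
        ((PySem.List.index?_isSome_iff parts flag).mpr hmem)
      rw [hk]
      obtain ⟨pre, suf, hdec, hlen, hnot⟩ := (PySem.List.index?_eq_some_iff parts flag k).mp hk
      simp only
      rw [hdec, fold_first flag pre suf hnot]
      match suf with
      | [] =>
        have hl : parts.length = k + 1 := by rw [hdec, ← hlen]; simp
        rw [if_neg (by simp; omega)]
        norm_num
      | v :: suf' =>
        have hl : parts.length = k + 2 + suf'.length := by rw [hdec, ← hlen]; simp; omega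
        rw [if_pos (by simp; omega)]
        have hg : PySem.List.pyGet? (pre ++ flag :: v :: suf') ((k : Int) + 1) = some v := by
          rw [show ((k : Int) + 1) = ((k + 1 : Nat) : Int) by push_cast; ring,
            PySem.List.pyGet?_natCast, ← hlen, get?_at_succ]
        have hfil := filter_enumerate_cut pre suf' flag v
        rw [hlen] at hfil
        rw [hg, hfil]
        norm_num
    · simp only [hmem, not_false_iff, if_true]
      rw [show parts.foldl (pfStep flag) (0, none, []) = (0, none, [] ++ parts) from
        fold_searching flag parts [] hmem]
      norm_num
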